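-- pv_equiv track=rewrite | github.com/neskk/droidsf | droidsf/smali_checks.py | doesMethodReturnNull
-- ===== SOURCE A (Python) =====
-- def doesMethodReturnNull(instructions):
--     for i in range(len(instructions) - 1, 0, -1):
--         if instructions[i] == "return-object v0":
--             if i - 2 >= 0 and instructions[i - 2] == "const/4 v0, 0x0":
--                 return True
--             elif i - 2 >= 0 and instructions[i - 2] == "new-array v0, v0, [Ljava/security/cert/X509Certificate;":
--                 if i - 4 >= 0 and instructions[i - 4] == "const/4 v0, 0x0":
--                     return True
--                 else:
--                     return False
--             else:
--                 return False
--         else: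
--             continue
--     return False
-- ===== SOURCE B (Python) =====
-- def doesMethodReturnNull(instructions):
--     # Single forward streaming pass: keep only the last four instructions in a
--     # rolling buffer and re-classify whenever a non-initial "return-object v0"
--     # streams by; the last classification wins. No indexing, no second pass.
--     result = False
--     b4 = b3 = b2 = b1 = None
--     first = True
--     for ins in instructions:
--         if not first and ins == "return-object v0":
--             if b2 == "const/4 v0, 0x0":
--                 result = True
--             elif b2 == "new-array v0, v0, [Ljava/security/cert/X509Certificate;":
--                 result = (b4 == "const/4 v0, 0x0")
--             else:
--                 result = False
--         b4, b3, b2, b1 = b3, b2, b1, ins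
--         first = False
--     return result
-- ===== Notes on version B (the rewrite author's own statement) =====
-- stated objective: alternative
-- what changed: A scans backward by index with early returns and random-access lookups at i-2/i-4; B is a single forward streaming pass that keeps a rolling buffer of the last four instructions and re-classifies in place at each non-initial 'return-object v0', so the last classification wins and no indexing occurs at all.
import Mathlib
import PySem

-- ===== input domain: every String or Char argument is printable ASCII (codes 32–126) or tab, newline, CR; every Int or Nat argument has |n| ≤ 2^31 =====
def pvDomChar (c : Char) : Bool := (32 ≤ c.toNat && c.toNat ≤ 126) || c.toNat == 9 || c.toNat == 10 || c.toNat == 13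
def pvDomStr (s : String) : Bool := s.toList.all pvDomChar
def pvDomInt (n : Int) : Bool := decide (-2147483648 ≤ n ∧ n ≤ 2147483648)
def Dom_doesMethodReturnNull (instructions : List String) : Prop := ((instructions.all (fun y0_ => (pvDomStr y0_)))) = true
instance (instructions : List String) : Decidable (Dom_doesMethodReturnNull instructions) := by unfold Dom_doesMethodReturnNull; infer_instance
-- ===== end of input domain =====

-- B replaces A's backward indexed scan by a single forward streaming pass over a rolling
-- buffer of the last four instructions (no indexing); same value everywhere.

-- ===== PORT A =====
-- the backward loop: for i in range(len-1, 0, -1), with A's early returns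
def doesMethodReturnNullGo (instructions : List String) : List Int → Bool
  | [] => false
  | i :: rest =>
    if PySem.List.pyGetD instructions i "" == "return-object v0" then
      if decide (0 ≤ i - 2) && (PySem.List.pyGetD instructions (i - 2) "" == "const/4 v0, 0x0") then
        true
      else if decide (0 ≤ i - 2) && (PySem.List.pyGetD instructions (i - 2) "" == "new-array v0, v0, [Ljava/security/cert/X509Certificate;") then
        decide (0 ≤ i - 4) && (PySem.List.pyGetD instructions (i - 4) "" == "const/4 v0, 0x0")
      else false
    else doesMethodReturnNullGo instructions rest

def doesMethodReturnNull (instructions : List String) : Bool :=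
  doesMethodReturnNullGo instructions (PySem.List.pyRange ((instructions.length : Int) - 1) 0 (-1))

-- ===== PORT B =====
-- loop state: (result, (b4, b3, b2, b1), first)
def bState := Bool × (Option String × Option String × Option String × Option String) × Bool

def bStep (st : bState) (ins : String) : bState :=
  let result := st.1
  let b4 := st.2.1.1
  let b3 := st.2.1.2.1
  let b2 := st.2.1.2.2.1
  let b1 := st.2.1.2.2.2
  let first := st.2.2
  let result' :=
    if !first && ins == "return-object v0" then
      if b2 == some "const/4 v0, 0x0" then true
      else if b2 == some "new-array v0, v0, [Ljava/security/cert/X509Certificate;" then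
        b4 == some "const/4 v0, 0x0"
      else false
    else result
  (result', (b3, b2, b1, some ins), false)

def doesMethodReturnNull_alt (instructions : List String) : Bool :=
  (instructions.foldl bStep (false, (none, none, none, none), true)).1

-- ===== PRECONDITION & SPEC =====
def Spec_doesMethodReturnNull (instructions : List String) (out : Bool) : Prop := out = doesMethodReturnNull_alt instructions
instance (instructions : List String) (out : Bool) : Decidable (Spec_doesMethodReturnNull instructions out) := by unfold Spec_doesMethodReturnNull; infer_instance

-- ===== CLAIM (what is proved, stated in full; the proofs are below) =====
def Claim_equal_doesMethodReturnNull : Prop := ∀ (instructions : List String), Dom_doesMethodReturnNull instructions → Spec_doesMethodReturnNull instructions (doesMethodReturnNull instructions)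

-- ===== LEMMAS AND PROOFS =====

-- a common reference function, recursive on the REVERSED list
def pvClassify (o2 o4 : Option String) : Bool :=
  if o2 == some "const/4 v0, 0x0" then true
  else if o2 == some "new-array v0, v0, [Ljava/security/cert/X509Certificate;" then
    o4 == some "const/4 v0, 0x0"
  else false

def pvGRec : List String → Bool
  | [] => false
  | x :: rl => if !rl.isEmpty && x == "return-object v0" then pvClassify rl[1]? rl[3]? else pvGRec rl

-- ---- B = pvGRec ∘ reverse, via a full-state invariant ----
theorem bFold_state (l : List String) :
    l.foldl bStep (false, (none, none, none, none), true) =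
      (pvGRec l.reverse, (l.reverse[3]?, l.reverse[2]?, l.reverse[1]?, l.reverse[0]?), l.isEmpty) := by
  induction l using List.reverseRecOn with
  | nil => rfl
  | append_singleton l x ih =>
    rw [List.foldl_append, ih]
    simp only [List.foldl_cons, List.foldl_nil, bStep, List.reverse_append, List.reverse_cons,
      List.reverse_nil, List.nil_append, List.cons_append, pvGRec]
    have hne2 : (l ++ [x]).isEmpty = false := by simp
    rw [hne2]
    cases hl : l.isEmpty <;>
      simp_all [List.isEmpty_iff, List.getElem?_cons_succ, pvClassify]

theorem bAlt_eq_g (l : List String) : doesMethodReturnNull_alt l = pvGRec l.reverse := by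
  unfold doesMethodReturnNull_alt
  rw [bFold_state]

-- ---- A = pvGRec ∘ reverse ----
-- goA only looks at indices in its list (and at i-2, i-4 guarded by nonnegativity)
theorem goA_append (l : List String) (x : String) (idxs : List Int)
    (h : ∀ i ∈ idxs, 0 ≤ i ∧ i < (l.length : Int)) :
    doesMethodReturnNullGo (l ++ [x]) idxs = doesMethodReturnNullGo l idxs := by
  induction idxs with
  | nil => rfl
  | cons i rest ih =>
    have hi := h i (by simp)
    have hget : ∀ j : Int, 0 ≤ j → j < (l.length : Int) →
        PySem.List.pyGetD (l ++ [x]) j "" = PySem.List.pyGetD l j "" := by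
      intro j hj0 hjl
      rw [PySem.List.pyGetD_of_nonneg _ _ hj0, PySem.List.pyGetD_of_nonneg _ _ hj0]
      have hjn : j.toNat < l.length := by omega
      simp [List.getD_eq_getElem?_getD, List.getElem?_append_left hjn]
    have hgi := hget i hi.1 hi.2
    simp only [doesMethodReturnNullGo, hgi]
    have h2 : (decide (0 ≤ i - 2) && (PySem.List.pyGetD (l ++ [x]) (i - 2) "" == "const/4 v0, 0x0"))
        = (decide (0 ≤ i - 2) && (PySem.List.pyGetD l (i - 2) "" == "const/4 v0, 0x0")) := by
      by_cases hc : 0 ≤ i - 2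
      · rw [hget (i - 2) hc (by omega)]
      · rw [decide_eq_false hc]; simp
    have h2' : (decide (0 ≤ i - 2) && (PySem.List.pyGetD (l ++ [x]) (i - 2) "" == "new-array v0, v0, [Ljava/security/cert/X509Certificate;"))
        = (decide (0 ≤ i - 2) && (PySem.List.pyGetD l (i - 2) "" == "new-array v0, v0, [Ljava/security/cert/X509Certificate;")) := by
      by_cases hc : 0 ≤ i - 2
      · rw [hget (i - 2) hc (by omega)]
      · rw [decide_eq_false hc]; simp
    have h4 : (decide (0 ≤ i - 4) && (PySem.List.pyGetD (l ++ [x]) (i - 4) "" == "const/4 v0, 0x0"))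
        = (decide (0 ≤ i - 4) && (PySem.List.pyGetD l (i - 4) "" == "const/4 v0, 0x0")) := by
      by_cases hc : 0 ≤ i - 4
      · rw [hget (i - 4) hc (by omega)]
      · rw [decide_eq_false hc]; simp
    rw [h2, h2', h4, ih (fun j hj => h j (by simp [hj]))]

-- the guarded pyGetD test at index len-k equals an Option comparison on the reverse at j = k-1
theorem guard_eq_rev (l : List String) (x s : String) (k : Int) (j : Nat)
    (hkj : k = (j : Int) + 1) :
    (decide (0 ≤ (l.length : Int) - k) &&
      (PySem.List.pyGetD (l ++ [x]) ((l.length : Int) - k) "" == s))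
      = (l.reverse[j]? == some s) := by
  by_cases hk : k ≤ (l.length : Int)
  · have hk0 : 0 ≤ (l.length : Int) - k := by omega
    have hjl : j < l.length := by omega
    have ht : ((l.length : Int) - k).toNat < l.length := by omega
    rw [PySem.List.pyGetD_of_nonneg _ _ hk0]
    have hrev : l.reverse[j]? = l[l.length - 1 - j]? := List.getElem?_reverse hjl
    have hidx : l.length - 1 - j = ((l.length : Int) - k).toNat := by omega
    rw [hrev, hidx]
    rw [List.getD_eq_getElem?_getD, List.getElem?_append_left ht]
    cases hg : l[((l.length : Int) - k).toNat]? with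
    | none => rw [List.getElem?_eq_none_iff] at hg; omega
    | some v =>
      rw [decide_eq_true hk0]
      simp
  · have hnone : l.reverse[j]? = none := by
      rw [List.getElem?_eq_none_iff]
      simp; omega
    rw [hnone, decide_eq_false (show ¬ (0 ≤ (l.length : Int) - k) by omega)]
    simp

theorem a_eq_g (l : List String) : doesMethodReturnNull l = pvGRec l.reverse := by
  induction l using List.reverseRecOn with
  | nil => rfl
  | append_singleton l x ih =>
    unfold doesMethodReturnNull
    have hlen : ((l ++ [x]).length : Int) - 1 = (l.length : Int) := by simp
    rw [hlen]
    by_cases hl : l = []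
    · subst hl
      simp [PySem.List.pyRange_neg_one_eq_nil, doesMethodReturnNullGo, pvGRec]
    · have hpos : 0 < (l.length : Int) := by
        have := List.length_pos_iff.mpr hl; omega
      rw [PySem.List.pyRange_neg_one_cons (by omega)]
      simp only [doesMethodReturnNullGo]
      have hx : PySem.List.pyGetD (l ++ [x]) (l.length : Int) "" = x := by
        rw [PySem.List.pyGetD_of_nonneg _ _ (by omega)]
        simp [List.getD_eq_getElem?_getD]
      rw [hx]
      rw [guard_eq_rev l x "const/4 v0, 0x0" 2 1 (by norm_num),
          guard_eq_rev l x "new-array v0, v0, [Ljava/security/cert/X509Certificate;" 2 1 (by norm_num),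
          guard_eq_rev l x "const/4 v0, 0x0" 4 3 (by norm_num)]
      have hrevx : (l ++ [x]).reverse = x :: l.reverse := by simp
      rw [hrevx]
      have hne : (l.reverse).isEmpty = false := by simp [hl]
      simp only [pvGRec, hne, Bool.not_false, Bool.true_and]
      by_cases hxr : (x == "return-object v0") = true
      · simp only [hxr, if_true, pvClassify]
      · have hxr' : (x == "return-object v0") = false := by
          cases h : (x == "return-object v0") <;> simp_all
        simp only [hxr', Bool.false_eq_true, if_false]
        rw [goA_append l x _ (by
          intro i hi
          rw [PySem.List.mem_pyRange_neg_one] at hi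
          omega)]
        unfold doesMethodReturnNull at ih
        exact ih

-- ===== VERDICT (by name: the statement is the Claim_ definition above) =====
theorem doesMethodReturnNull_spec : Claim_equal_doesMethodReturnNull := by
  intro instructions _
  unfold Spec_doesMethodReturnNull
  rw [a_eq_g, bAlt_eq_g]
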